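-- pv_equiv track=rewrite | github.com/wr-hamburg/energy2020-compression | scil/dev/create-datatype-variants.py | createFunctionList
-- ===== SOURCE A (Python) =====
-- def createFunctionList(datatypes_list):
--   DATATYPES_FULL=["float","double","int8_t","int16_t","int32_t","int64_t"]
--
--   datatypes_functions = [ "NULL" for x in DATATYPES_FULL for y in ["compress", "decompress"]]
--   datatypes_supported = []
--   for d in datatypes_list:
--     d = d.strip()
--     if (d in DATATYPES_FULL):
--       pos = DATATYPES_FULL.index(d)
--       datatypes_supported.append(d)
--       datatypes_functions[pos*2] = "compress_" + d
--       datatypes_functions[pos*2+1] = "decompress_" + d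
--   return datatypes_functions
-- ===== SOURCE B (Python) =====
-- def createFunctionList(datatypes_list):
--   DATATYPES_FULL = ["float", "double", "int8_t", "int16_t", "int32_t", "int64_t"]
--   present = {d.strip() for d in datatypes_list}
--   out = []
--   for d in DATATYPES_FULL:
--     if d in present:
--       out.append("compress_" + d)
--       out.append("decompress_" + d)
--     else:
--       out.append("NULL")
--       out.append("NULL")
--   return out
-- ===== Notes on version B (the rewrite author's own statement) =====
-- stated objective: simpler
-- what changed: B builds a set of the stripped input names once and gathers the output in a single pass over the canonical datatype list, instead of A's preallocated NULL list with scatter-writes via .index and an unused datatypes_supported accumulator.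
import Mathlib
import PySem

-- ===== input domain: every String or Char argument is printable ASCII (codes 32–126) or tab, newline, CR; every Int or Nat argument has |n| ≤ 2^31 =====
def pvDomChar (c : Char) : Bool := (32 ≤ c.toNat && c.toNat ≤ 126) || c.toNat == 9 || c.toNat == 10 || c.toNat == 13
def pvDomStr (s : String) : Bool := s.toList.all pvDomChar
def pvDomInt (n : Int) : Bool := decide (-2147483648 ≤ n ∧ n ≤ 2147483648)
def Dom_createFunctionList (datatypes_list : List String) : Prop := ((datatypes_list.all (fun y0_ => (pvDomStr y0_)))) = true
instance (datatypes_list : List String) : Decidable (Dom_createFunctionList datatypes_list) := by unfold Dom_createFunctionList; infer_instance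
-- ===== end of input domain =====

-- B gathers over the canonical datatype list with a set of stripped names, replacing A's preallocated NULL list with scatter-writes via .index; objective: simpler.


def pvDFull : List String := ["float", "double", "int8_t", "int16_t", "int32_t", "int64_t"]

-- ===== PORT A =====
-- loop body of A's for-loop; state = (datatypes_functions, datatypes_supported)
def pvStepA (st : List String × List String) (d0 : String) : List String × List String :=
  let d := PySem.Str.strip d0
  if pvDFull.contains d then
    match PySem.List.index? pvDFull d with
    | some pos =>
        (((st.1.set (pos * 2) ("compress_" ++ d)).set (pos * 2 + 1) ("decompress_" ++ d)),
         st.2 ++ [d])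
    | none => st   -- unreachable: contains holds
  else st

def createFunctionList (datatypes_list : List String) : List String :=
  let init := pvDFull.flatMap (fun _ => ["compress", "decompress"].map (fun _ => "NULL"))
  (datatypes_list.foldl pvStepA (init, [])).1

-- ===== PORT B =====
def createFunctionList_alt (datatypes_list : List String) : List String :=
  let present : PySem.Set String := PySem.Set.ofList (datatypes_list.map PySem.Str.strip)
  pvDFull.foldl
    (fun out d =>
      if PySem.Set.contains present d then
        out ++ ["compress_" ++ d, "decompress_" ++ d]
      else
        out ++ ["NULL", "NULL"]) []

-- ===== PRECONDITION & SPEC =====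
def Spec_createFunctionList (datatypes_list : List String) (out : List String) : Prop := out = createFunctionList_alt datatypes_list
instance (datatypes_list : List String) (out : List String) : Decidable (Spec_createFunctionList datatypes_list out) := by unfold Spec_createFunctionList; infer_instance

-- ===== CLAIM (what is proved, stated in full; the proofs are below) =====
def Claim_equal_createFunctionList : Prop := ∀ (datatypes_list : List String), Dom_createFunctionList datatypes_list → Spec_createFunctionList datatypes_list (createFunctionList datatypes_list)


-- ===== LEMMAS AND PROOFS =====

-- the function table as a function of which datatypes have been seen
def pvF (b1 b2 b3 b4 b5 b6 : Bool) : List String :=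
  [cond b1 "compress_float" "NULL", cond b1 "decompress_float" "NULL",
   cond b2 "compress_double" "NULL", cond b2 "decompress_double" "NULL",
   cond b3 "compress_int8_t" "NULL", cond b3 "decompress_int8_t" "NULL",
   cond b4 "compress_int16_t" "NULL", cond b4 "decompress_int16_t" "NULL",
   cond b5 "compress_int32_t" "NULL", cond b5 "decompress_int32_t" "NULL",
   cond b6 "compress_int64_t" "NULL", cond b6 "decompress_int64_t" "NULL"]

theorem pvStep_hit1 (b1 b2 b3 b4 b5 b6 : Bool) (sup : List String) (d : String)
    (h : PySem.Str.strip d = "float") :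
    pvStepA (pvF b1 b2 b3 b4 b5 b6, sup) d = (pvF true b2 b3 b4 b5 b6, sup ++ ["float"]) := by
  simp only [pvStepA, h]
  cases b1 <;> cases b2 <;> cases b3 <;> cases b4 <;> cases b5 <;> cases b6 <;> rfl

theorem pvStep_hit2 (b1 b2 b3 b4 b5 b6 : Bool) (sup : List String) (d : String)
    (h : PySem.Str.strip d = "double") :
    pvStepA (pvF b1 b2 b3 b4 b5 b6, sup) d = (pvF b1 true b3 b4 b5 b6, sup ++ ["double"]) := by
  simp only [pvStepA, h]
  cases b1 <;> cases b2 <;> cases b3 <;> cases b4 <;> cases b5 <;> cases b6 <;> rfl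

theorem pvStep_hit3 (b1 b2 b3 b4 b5 b6 : Bool) (sup : List String) (d : String)
    (h : PySem.Str.strip d = "int8_t") :
    pvStepA (pvF b1 b2 b3 b4 b5 b6, sup) d = (pvF b1 b2 true b4 b5 b6, sup ++ ["int8_t"]) := by
  simp only [pvStepA, h]
  cases b1 <;> cases b2 <;> cases b3 <;> cases b4 <;> cases b5 <;> cases b6 <;> rfl

theorem pvStep_hit4 (b1 b2 b3 b4 b5 b6 : Bool) (sup : List String) (d : String)
    (h : PySem.Str.strip d = "int16_t") :
    pvStepA (pvF b1 b2 b3 b4 b5 b6, sup) d = (pvF b1 b2 b3 true b5 b6, sup ++ ["int16_t"]) := by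
  simp only [pvStepA, h]
  cases b1 <;> cases b2 <;> cases b3 <;> cases b4 <;> cases b5 <;> cases b6 <;> rfl

theorem pvStep_hit5 (b1 b2 b3 b4 b5 b6 : Bool) (sup : List String) (d : String)
    (h : PySem.Str.strip d = "int32_t") :
    pvStepA (pvF b1 b2 b3 b4 b5 b6, sup) d = (pvF b1 b2 b3 b4 true b6, sup ++ ["int32_t"]) := by
  simp only [pvStepA, h]
  cases b1 <;> cases b2 <;> cases b3 <;> cases b4 <;> cases b5 <;> cases b6 <;> rfl

theorem pvStep_hit6 (b1 b2 b3 b4 b5 b6 : Bool) (sup : List String) (d : String)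
    (h : PySem.Str.strip d = "int64_t") :
    pvStepA (pvF b1 b2 b3 b4 b5 b6, sup) d = (pvF b1 b2 b3 b4 b5 true, sup ++ ["int64_t"]) := by
  simp only [pvStepA, h]
  cases b1 <;> cases b2 <;> cases b3 <;> cases b4 <;> cases b5 <;> cases b6 <;> rfl


theorem pvStep_miss (st : List String × List String) (d : String)
    (h1 : PySem.Str.strip d ≠ "float") (h2 : PySem.Str.strip d ≠ "double")
    (h3 : PySem.Str.strip d ≠ "int8_t") (h4 : PySem.Str.strip d ≠ "int16_t")
    (h5 : PySem.Str.strip d ≠ "int32_t") (h6 : PySem.Str.strip d ≠ "int64_t") :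
    pvStepA st d = st := by
  simp only [pvStepA]
  rw [if_neg]
  simp [pvDFull, h1, h2, h3, h4, h5, h6]

theorem pvLoop (l : List String) : ∀ (sup : List String) (b1 b2 b3 b4 b5 b6 : Bool),
    (l.foldl pvStepA (pvF b1 b2 b3 b4 b5 b6, sup)).1
      = pvF (b1 || (l.map PySem.Str.strip).contains "float")
            (b2 || (l.map PySem.Str.strip).contains "double")
            (b3 || (l.map PySem.Str.strip).contains "int8_t")
            (b4 || (l.map PySem.Str.strip).contains "int16_t")
            (b5 || (l.map PySem.Str.strip).contains "int32_t")
            (b6 || (l.map PySem.Str.strip).contains "int64_t") := by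
  induction l with
  | nil => intro sup b1 b2 b3 b4 b5 b6; simp
  | cons d t ih =>
    intro sup b1 b2 b3 b4 b5 b6
    by_cases h1 : PySem.Str.strip d = "float"
    · simp only [List.foldl_cons, pvStep_hit1 b1 b2 b3 b4 b5 b6 sup d h1, ih, List.map_cons,
        List.contains_cons, h1]
      simp
    by_cases h2 : PySem.Str.strip d = "double"
    · simp only [List.foldl_cons, pvStep_hit2 b1 b2 b3 b4 b5 b6 sup d h2, ih, List.map_cons,
        List.contains_cons, h2]
      simp
    by_cases h3 : PySem.Str.strip d = "int8_t"
    · simp only [List.foldl_cons, pvStep_hit3 b1 b2 b3 b4 b5 b6 sup d h3, ih, List.map_cons,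
        List.contains_cons, h3]
      simp
    by_cases h4 : PySem.Str.strip d = "int16_t"
    · simp only [List.foldl_cons, pvStep_hit4 b1 b2 b3 b4 b5 b6 sup d h4, ih, List.map_cons,
        List.contains_cons, h4]
      simp
    by_cases h5 : PySem.Str.strip d = "int32_t"
    · simp only [List.foldl_cons, pvStep_hit5 b1 b2 b3 b4 b5 b6 sup d h5, ih, List.map_cons,
        List.contains_cons, h5]
      simp
    by_cases h6 : PySem.Str.strip d = "int64_t"
    · simp only [List.foldl_cons, pvStep_hit6 b1 b2 b3 b4 b5 b6 sup d h6, ih, List.map_cons,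
        List.contains_cons, h6]
      simp
    · simp only [List.foldl_cons, pvStep_miss _ d h1 h2 h3 h4 h5 h6, ih, List.map_cons,
        List.contains_cons]
      have g1 : ("float" == PySem.Str.strip d) = false := by rw [beq_eq_false_iff_ne]; exact fun e => h1 e.symm
      have g2 : ("double" == PySem.Str.strip d) = false := by rw [beq_eq_false_iff_ne]; exact fun e => h2 e.symm
      have g3 : ("int8_t" == PySem.Str.strip d) = false := by rw [beq_eq_false_iff_ne]; exact fun e => h3 e.symm
      have g4 : ("int16_t" == PySem.Str.strip d) = false := by rw [beq_eq_false_iff_ne]; exact fun e => h4 e.symm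
      have g5 : ("int32_t" == PySem.Str.strip d) = false := by rw [beq_eq_false_iff_ne]; exact fun e => h5 e.symm
      have g6 : ("int64_t" == PySem.Str.strip d) = false := by rw [beq_eq_false_iff_ne]; exact fun e => h6 e.symm
      simp [g1, g2, g3, g4, g5, g6]

theorem pvContains_ofList (l : List String) (v : String) :
    PySem.Set.contains (PySem.Set.ofList l) v = l.contains v := by
  simp [PySem.Set.contains, PySem.Set.mem_ofList]

theorem pvAlt (l : List String) :
    createFunctionList_alt l
      = pvF ((l.map PySem.Str.strip).contains "float")
            ((l.map PySem.Str.strip).contains "double")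
            ((l.map PySem.Str.strip).contains "int8_t")
            ((l.map PySem.Str.strip).contains "int16_t")
            ((l.map PySem.Str.strip).contains "int32_t")
            ((l.map PySem.Str.strip).contains "int64_t") := by
  simp only [createFunctionList_alt, pvDFull, List.foldl_cons, List.foldl_nil, pvContains_ofList]
  generalize (l.map PySem.Str.strip).contains "float" = b1
  generalize (l.map PySem.Str.strip).contains "double" = b2
  generalize (l.map PySem.Str.strip).contains "int8_t" = b3
  generalize (l.map PySem.Str.strip).contains "int16_t" = b4
  generalize (l.map PySem.Str.strip).contains "int32_t" = b5
  generalize (l.map PySem.Str.strip).contains "int64_t" = b6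
  cases b1 <;> cases b2 <;> cases b3 <;> cases b4 <;> cases b5 <;> cases b6 <;> rfl

-- ===== VERDICT (by name: the statement is the Claim_ definition above) =====
theorem createFunctionList_spec : Claim_equal_createFunctionList := by
  intro l _
  show createFunctionList l = createFunctionList_alt l
  have hinit : (pvDFull.flatMap (fun _ => ["compress", "decompress"].map (fun _ => "NULL")))
      = pvF false false false false false false := rfl
  simp only [createFunctionList, hinit, pvLoop, Bool.false_or, pvAlt]
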